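-- pv_equiv track=rewrite | github.com/risingbear/tfif | tfif_core.py | recursive_function
-- ===== SOURCE A (Python) =====
-- def recursive_function(P, n, depth=0, max_depth=9):
--     """
--     TFIF-style recursive decomposition:
--     R(P, n) = f(R(P1, n-1), R(P2, n-1), R(P3, n-1))
--     """
--     if n <= 0 or depth >= max_depth:
--         return P
--     return (
--         recursive_function(P + 1, n - 1, depth + 1, max_depth) +
--         recursive_function(P + 2, n - 1, depth + 1, max_depth) +
--         recursive_function(P + 3, n - 1, depth + 1, max_depth)
--     )
-- ===== SOURCE B (Python) =====
-- def recursive_function(P, n, depth=0, max_depth=9):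
--     # Closed form: the recursion tree has d = min(n, max_depth - depth) levels
--     # (0 if n <= 0 or depth >= max_depth); each level triples the leaves and
--     # adds 1+2+3 across branches, giving 3**d * (P + 2*d).
--     d = 0 if n <= 0 or depth >= max_depth else min(n, max_depth - depth)
--     return 3 ** d * (P + 2 * d)
-- ===== Notes on version B (the rewrite author's own statement) =====
-- stated objective: alternative
-- what changed: Replaced the ternary recursion (3^d calls) by the closed form 3^d * (P + 2*d) with d = min(n, max_depth - depth) clamped at 0.
import Mathlib
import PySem

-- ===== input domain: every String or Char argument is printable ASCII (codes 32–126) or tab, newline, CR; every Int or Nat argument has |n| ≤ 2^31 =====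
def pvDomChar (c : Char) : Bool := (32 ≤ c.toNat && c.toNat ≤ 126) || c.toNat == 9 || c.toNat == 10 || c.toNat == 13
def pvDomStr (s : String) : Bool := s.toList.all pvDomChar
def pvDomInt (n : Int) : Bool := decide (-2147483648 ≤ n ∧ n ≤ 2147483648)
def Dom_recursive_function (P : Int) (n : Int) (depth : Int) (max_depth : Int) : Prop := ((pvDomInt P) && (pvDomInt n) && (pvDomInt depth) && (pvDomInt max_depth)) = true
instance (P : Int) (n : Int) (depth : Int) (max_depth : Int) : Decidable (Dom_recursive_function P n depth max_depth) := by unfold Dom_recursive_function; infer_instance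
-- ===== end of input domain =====

-- B replaces the ternary recursion by the closed form 3^d*(P+2d), d = min(n, max_depth - depth) clamped at 0.


-- ===== PORT A =====
def recursive_function (P : Int) (n : Int) (depth : Int) (max_depth : Int) : Int :=
  if n ≤ 0 ∨ depth ≥ max_depth then P
  else
    recursive_function (P + 1) (n - 1) (depth + 1) max_depth +
    recursive_function (P + 2) (n - 1) (depth + 1) max_depth +
    recursive_function (P + 3) (n - 1) (depth + 1) max_depth
termination_by (max_depth - depth).toNat
decreasing_by all_goals (simp at *; omega)

-- ===== PORT B =====
-- Closed form: d levels of ternary branching, each level triples the leaves and adds 1+2+3.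
def recursive_function_alt (P : Int) (n : Int) (depth : Int) (max_depth : Int) : Int :=
  let d : Int := if n ≤ 0 ∨ depth ≥ max_depth then 0 else min n (max_depth - depth)
  3 ^ d.toNat * (P + 2 * d)

-- ===== PRECONDITION & SPEC =====
-- Pre_ excludes only inputs whose effective recursion depth d = min(n, max_depth - depth)
-- exceeds 990: beyond Python's default recursion limit A raises RecursionError, and at the
-- limit's edge (d close to 1000) A's 3^d nested calls never complete; every input on which
-- A actually returns a value lies inside Pre_ (the equality proof below holds unconditionally).
def Pre_recursive_function (P : Int) (n : Int) (depth : Int) (max_depth : Int) : Prop :=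
  n ≤ 0 ∨ depth ≥ max_depth ∨ min n (max_depth - depth) ≤ 990
instance (P : Int) (n : Int) (depth : Int) (max_depth : Int) : Decidable (Pre_recursive_function P n depth max_depth) := by unfold Pre_recursive_function; infer_instance
def pvWitness_recursive_function : Int × Int × Int × Int := (5, 3, 0, 9)

def Spec_recursive_function (P : Int) (n : Int) (depth : Int) (max_depth : Int) (out : Int) : Prop := out = recursive_function_alt P n depth max_depth
instance (P : Int) (n : Int) (depth : Int) (max_depth : Int) (out : Int) : Decidable (Spec_recursive_function P n depth max_depth out) := by unfold Spec_recursive_function; infer_instance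

-- ===== CLAIM (what is proved, stated in full; the proofs are below) =====
def Claim_equal_recursive_function : Prop := ∀ (P : Int) (n : Int) (depth : Int) (max_depth : Int), Dom_recursive_function P n depth max_depth → Pre_recursive_function P n depth max_depth → Spec_recursive_function P n depth max_depth (recursive_function P n depth max_depth)

-- ===== LEMMAS AND PROOFS =====
-- One step of the closed form: summing the three children's closed forms gives the parent's.
lemma alt_step (P n depth md : Int) (hn : 0 < n) (hd : depth < md) :
    recursive_function_alt (P + 1) (n - 1) (depth + 1) md +
    recursive_function_alt (P + 2) (n - 1) (depth + 1) md +
    recursive_function_alt (P + 3) (n - 1) (depth + 1) md =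
    recursive_function_alt P n depth md := by
  simp only [recursive_function_alt]
  rw [if_neg (by omega : ¬ (n ≤ 0 ∨ depth ≥ md))]
  by_cases h : n - 1 ≤ 0 ∨ depth + 1 ≥ md
  · have h1 : min n (md - depth) = 1 := by omega
    rw [if_pos h, h1]
    norm_num
    ring
  · rw [if_neg h]
    have hmin : min (n - 1) (md - (depth + 1)) = min n (md - depth) - 1 := by omega
    rw [hmin]
    set d := min n (md - depth) with hdd
    have h1 : 1 ≤ d := by omega
    have h2 : d.toNat = (d - 1).toNat + 1 := by omega
    rw [h2, pow_succ]
    ring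

lemma rf_eq_alt (P n depth max_depth : Int) :
    recursive_function P n depth max_depth = recursive_function_alt P n depth max_depth := by
  induction hk : (max_depth - depth).toNat generalizing P n depth with
  | zero =>
    have h : n ≤ 0 ∨ depth ≥ max_depth := by omega
    rw [recursive_function, if_pos h]
    simp [recursive_function_alt, if_pos h]
  | succ k ih =>
    rw [recursive_function]
    by_cases h : n ≤ 0 ∨ depth ≥ max_depth
    · rw [if_pos h]
      simp [recursive_function_alt, if_pos h]
    · rw [if_neg h]
      have hk' : (max_depth - (depth + 1)).toNat = k := by omega
      rw [ih _ _ _ hk', ih _ _ _ hk', ih _ _ _ hk']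
      exact alt_step P n depth max_depth (by omega) (by omega)

-- ===== VERDICT (by name: the statement is the Claim_ definition above) =====
theorem recursive_function_spec : Claim_equal_recursive_function := by
  intro P n depth max_depth _ _
  exact rf_eq_alt P n depth max_depth
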